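-- pv_equiv track=rewrite | github.com/jhillierdavis/advent-of-code-solutions | aoc-2024/aoc-2024-day-16/solution-in-python3/solution_part2.py | count_unique_path_points
-- ===== SOURCE A (Python) =====
-- from collections import defaultdict, deque
--
-- def count_unique_path_points(end_states, backtrack_map):
--     states = deque(end_states)
--     seen = set(end_states)
--
--     while states:
--         key = states.popleft()
--         for last in backtrack_map.get(key, set()):
--             if last in seen:
--                 continue
--             seen.add(last)
--             states.append(last)
--
--     count = len({(r, c) for r, c, _, _ in seen})
--     return count
-- ===== SOURCE B (Python) =====
-- def count_unique_path_points(end_states, backtrack_map):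
--     # Round-based saturation (level-synchronous fixed point) instead of a worklist BFS:
--     # each round adds the predecessors of everything seen so far; stop at a fixed point.
--     rounds = 1 + len(end_states) + sum(len(v) for v in backtrack_map.values())
--     seen = set(end_states)
--     for _ in range(rounds):
--         new = set(seen)
--         for s in seen:
--             for p in backtrack_map.get(s, ()):
--                 new.add(p)
--         if len(new) == len(seen):
--             break
--         seen = new
--     return len({(r, c) for r, c, _, _ in seen})
-- ===== Notes on version B (the rewrite author's own statement) =====
-- stated objective: alternative
-- what changed: Replaces the deque worklist BFS by a level-synchronous fixed-point saturation: each round rescans the whole seen set and unions in all predecessors, stopping when a round adds nothing; the queue disappears entirely.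
import Mathlib
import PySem

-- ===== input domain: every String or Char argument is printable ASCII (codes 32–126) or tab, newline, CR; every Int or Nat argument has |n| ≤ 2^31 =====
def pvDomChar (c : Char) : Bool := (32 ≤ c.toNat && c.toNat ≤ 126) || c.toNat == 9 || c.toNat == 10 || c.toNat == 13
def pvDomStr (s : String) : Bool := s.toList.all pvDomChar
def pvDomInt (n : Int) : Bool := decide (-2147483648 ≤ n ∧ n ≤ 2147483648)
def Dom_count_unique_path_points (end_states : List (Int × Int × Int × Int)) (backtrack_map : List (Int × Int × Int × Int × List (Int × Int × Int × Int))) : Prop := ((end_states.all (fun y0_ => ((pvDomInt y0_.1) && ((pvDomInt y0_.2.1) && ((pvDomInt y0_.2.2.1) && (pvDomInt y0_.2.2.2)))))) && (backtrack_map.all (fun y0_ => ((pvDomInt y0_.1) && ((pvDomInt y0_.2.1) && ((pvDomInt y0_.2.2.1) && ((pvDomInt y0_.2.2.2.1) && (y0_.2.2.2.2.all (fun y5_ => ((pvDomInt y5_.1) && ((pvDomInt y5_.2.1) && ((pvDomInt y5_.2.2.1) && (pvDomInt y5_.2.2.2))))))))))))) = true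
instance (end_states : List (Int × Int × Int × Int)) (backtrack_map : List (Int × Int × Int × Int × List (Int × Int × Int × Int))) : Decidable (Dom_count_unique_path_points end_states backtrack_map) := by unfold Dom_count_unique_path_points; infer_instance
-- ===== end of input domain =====

-- B replaces A's deque-worklist BFS by round-based fixed-point saturation (no queue);
-- objective: alternative (a genuinely different traversal of the same reachable set, not faster).

abbrev PVS : Type := Int × Int × Int × Int

-- shared helper: the dict as an association list of (state, predecessor-list)
def pvAssoc (bm : List (Int × Int × Int × Int × List (Int × Int × Int × Int))) : List (PVS × List PVS) :=
  bm.map (fun p => ((p.1, p.2.1, p.2.2.1, p.2.2.2.1), p.2.2.2.2))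

-- backtrack_map.get(key, set())
def pvPreds (bm : List (Int × Int × Int × Int × List (Int × Int × Int × Int))) (s : PVS) : List PVS :=
  PySem.Dict.getD ⟨pvAssoc bm⟩ s []

-- ===== PORT A =====
-- the while-states loop; fuel is a totality guard only (proved sufficient below)
def pvBfs (bm : List (Int × Int × Int × Int × List (Int × Int × Int × Int))) :
    Nat → List PVS → PySem.Set PVS → PySem.Set PVS
  | 0, _, seen => seen
  | _ + 1, [], seen => seen
  | fuel + 1, key :: rest, seen =>
      let st := (pvPreds bm key).foldl
        (fun acc last =>
          if PySem.Set.contains acc.1 last then acc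
          else (PySem.Set.add acc.1 last, acc.2 ++ [last]))
        (seen, rest)
      pvBfs bm fuel st.2 st.1

def count_unique_path_points (end_states : List (Int × Int × Int × Int)) (backtrack_map : List (Int × Int × Int × Int × List (Int × Int × Int × Int))) : Int :=
  let fuel := end_states.length + (end_states.length + ((pvAssoc backtrack_map).map (fun p => p.2)).flatten.length) + 1
  let seen := pvBfs backtrack_map fuel end_states (PySem.Set.ofList end_states)
  PySem.Set.len (PySem.Set.ofList (seen.map (fun s => (s.1, s.2.1))))

-- ===== PORT B =====
-- one saturation round: new = set(seen); for s in seen: for p in get(s,()): new.add(p)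
def pvRound (bm : List (Int × Int × Int × Int × List (Int × Int × Int × Int))) (seen : PySem.Set PVS) : PySem.Set PVS :=
  seen.foldl (fun nw s => (pvPreds bm s).foldl PySem.Set.add nw) (PySem.Set.ofList seen)

-- for _ in range(rounds): …; break when a round adds nothing
def pvSat (bm : List (Int × Int × Int × Int × List (Int × Int × Int × Int))) :
    Nat → PySem.Set PVS → PySem.Set PVS
  | 0, seen => seen
  | r + 1, seen =>
      let nw := pvRound bm seen
      if nw.length = seen.length then seen else pvSat bm r nw

def count_unique_path_points_alt (end_states : List (Int × Int × Int × Int)) (backtrack_map : List (Int × Int × Int × Int × List (Int × Int × Int × Int))) : Int :=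
  let rounds := 1 + end_states.length + ((PySem.Dict.values ⟨pvAssoc backtrack_map⟩).map List.length).sum
  let seen := pvSat backtrack_map rounds (PySem.Set.ofList end_states)
  PySem.Set.len (PySem.Set.ofList (seen.map (fun s => (s.1, s.2.1))))

-- ===== PRECONDITION & SPEC =====
def Spec_count_unique_path_points (end_states : List (Int × Int × Int × Int)) (backtrack_map : List (Int × Int × Int × Int × List (Int × Int × Int × Int))) (out : Int) : Prop := out = count_unique_path_points_alt end_states backtrack_map
instance (end_states : List (Int × Int × Int × Int)) (backtrack_map : List (Int × Int × Int × Int × List (Int × Int × Int × Int))) (out : Int) : Decidable (Spec_count_unique_path_points end_states backtrack_map out) := by unfold Spec_count_unique_path_points; infer_instance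

-- ===== CLAIM (what is proved, stated in full; the proofs are below) =====
def Claim_equal_count_unique_path_points : Prop := ∀ (end_states : List (Int × Int × Int × Int)) (backtrack_map : List (Int × Int × Int × Int × List (Int × Int × Int × Int))), Dom_count_unique_path_points end_states backtrack_map → Spec_count_unique_path_points end_states backtrack_map (count_unique_path_points end_states backtrack_map)

-- ===== LEMMAS AND PROOFS =====

-- the predecessor edge relation and reachability from the end states
def pvEdge (bm : List (Int × Int × Int × Int × List (Int × Int × Int × Int))) (a b : PVS) : Prop :=
  b ∈ pvPreds bm a

def pvReach (bm : List (Int × Int × Int × Int × List (Int × Int × Int × Int))) (ends : List PVS) (s : PVS) : Prop :=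
  ∃ e ∈ ends, Relation.ReflTransGen (pvEdge bm) e s

-- the finite universe every reachable state lives in
def pvVals (bm : List (Int × Int × Int × Int × List (Int × Int × Int × Int))) : List PVS :=
  ((pvAssoc bm).map (fun p => p.2)).flatten

def pvUniv (ends : List PVS) (bm : List (Int × Int × Int × Int × List (Int × Int × Int × Int))) : Finset PVS :=
  (ends ++ pvVals bm).toFinset

theorem pvPreds_subset_vals (bm : List (Int × Int × Int × Int × List (Int × Int × Int × Int))) (s b : PVS)
    (h : b ∈ pvPreds bm s) : b ∈ pvVals bm := by
  unfold pvPreds PySem.Dict.getD PySem.Dict.get? at h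
  unfold pvVals
  cases hf : List.find? (fun p => p.1 == s) (PySem.Dict.mk (pvAssoc bm)).items with
  | none => rw [hf] at h; simp at h
  | some p =>
      rw [hf] at h
      simp only [Option.map_some, Option.getD_some] at h
      have hp : p ∈ pvAssoc bm := List.mem_of_find?_eq_some hf
      exact List.mem_flatten.mpr ⟨p.2, List.mem_map.mpr ⟨p, hp, rfl⟩, h⟩

theorem pvReach_mem_closed (bm : List (Int × Int × Int × Int × List (Int × Int × Int × Int)))
    (ends : List PVS) (P : PVS → Prop)
    (hE : ∀ e ∈ ends, P e) (hC : ∀ a, P a → ∀ b ∈ pvPreds bm a, P b)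
    (s : PVS) (h : pvReach bm ends s) : P s := by
  obtain ⟨e, he, hpath⟩ := h
  induction hpath with
  | refl => exact hE e he
  | tail _ hedge ih => exact hC _ ih _ hedge


-- length ≤ card of a covering finset, for the termination arguments
theorem pv_len_le_card (l : List PVS) (U : Finset PVS) (hnd : l.Nodup) (hsub : ∀ x ∈ l, x ∈ U) :
    l.length ≤ U.card := by
  rw [← List.toFinset_card_of_nodup hnd]
  exact Finset.card_le_card (fun x hx => hsub x (List.mem_toFinset.mp hx))

-- the body of A's inner for-loop, named for the lemmas
def pvF : PySem.Set PVS × List PVS → PVS → PySem.Set PVS × List PVS :=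
  fun acc last =>
    if PySem.Set.contains acc.1 last then acc
    else (PySem.Set.add acc.1 last, acc.2 ++ [last])

theorem pvBfs_cons (bm : List (Int × Int × Int × Int × List (Int × Int × Int × Int)))
    (fuel : Nat) (key : PVS) (rest : List PVS) (seen : PySem.Set PVS) :
    pvBfs bm (fuel + 1) (key :: rest) seen =
      pvBfs bm fuel ((pvPreds bm key).foldl pvF (seen, rest)).2
        ((pvPreds bm key).foldl pvF (seen, rest)).1 := rfl

theorem pvF_seen_mono (l : List PVS) : ∀ (seen : PySem.Set PVS) (q : List PVS) (x : PVS),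
    x ∈ seen → x ∈ (l.foldl pvF (seen, q)).1 := by
  induction l with
  | nil => intro seen q x hx; exact hx
  | cons a l ih =>
      intro seen q x hx
      simp only [List.foldl_cons, pvF]
      split
      · exact ih seen q x hx
      · exact ih _ _ x ((PySem.Set.mem_add seen a x).mpr (Or.inl hx))

theorem pvF_q_mono (l : List PVS) : ∀ (seen : PySem.Set PVS) (q : List PVS) (x : PVS),
    x ∈ q → x ∈ (l.foldl pvF (seen, q)).2 := by
  induction l with
  | nil => intro seen q x hx; exact hx
  | cons a l ih =>
      intro seen q x hx
      simp only [List.foldl_cons, pvF]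
      split
      · exact ih seen q x hx
      · exact ih _ _ x (List.mem_append.mpr (Or.inl hx))

theorem pvF_seen_sub (l : List PVS) : ∀ (seen : PySem.Set PVS) (q : List PVS) (x : PVS),
    x ∈ (l.foldl pvF (seen, q)).1 → x ∈ seen ∨ x ∈ l := by
  induction l with
  | nil => intro seen q x hx; exact Or.inl hx
  | cons a l ih =>
      intro seen q x hx
      simp only [List.foldl_cons, pvF] at hx
      split at hx
      · rcases ih seen q x hx with h | h
        · exact Or.inl h
        · exact Or.inr (List.mem_cons_of_mem a h)
      · rcases ih _ _ x hx with h | h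
        · rcases (PySem.Set.mem_add seen a x).mp h with h | h
          · exact Or.inl h
          · exact Or.inr (h ▸ List.mem_cons_self)
        · exact Or.inr (List.mem_cons_of_mem a h)

theorem pvF_covers (l : List PVS) : ∀ (seen : PySem.Set PVS) (q : List PVS) (x : PVS),
    x ∈ l → x ∈ (l.foldl pvF (seen, q)).1 := by
  induction l with
  | nil => intro seen q x hx; cases hx
  | cons a l ih =>
      intro seen q x hx
      simp only [List.foldl_cons, pvF]
      rcases List.mem_cons.mp hx with rfl | hx
      · split
        · next hc => exact pvF_seen_mono l seen q x (by simpa using hc)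
        · exact pvF_seen_mono l _ _ x ((PySem.Set.mem_add seen x x).mpr (Or.inr rfl))
      · split
        · exact ih seen q x hx
        · exact ih _ _ x hx

theorem pvF_q_sub (l : List PVS) : ∀ (seen : PySem.Set PVS) (q : List PVS) (x : PVS),
    x ∈ (l.foldl pvF (seen, q)).2 → x ∈ q ∨ x ∈ (l.foldl pvF (seen, q)).1 := by
  induction l with
  | nil => intro seen q x hx; exact Or.inl hx
  | cons a l ih =>
      intro seen q x hx
      simp only [List.foldl_cons, pvF] at hx ⊢
      by_cases hc : PySem.Set.contains seen a = true
      · rw [if_pos hc] at hx ⊢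
        exact ih seen q x hx
      · rw [if_neg hc] at hx ⊢
        rcases ih _ _ x hx with h | h
        · rcases List.mem_append.mp h with h | h
          · exact Or.inl h
          · refine Or.inr ?_
            have hxa : x = a := by simpa using h
            subst hxa
            exact pvF_seen_mono l _ _ x ((PySem.Set.mem_add seen x x).mpr (Or.inr rfl))
        · exact Or.inr h

theorem pvF_seen_in_q (l : List PVS) : ∀ (seen : PySem.Set PVS) (q : List PVS) (x : PVS),
    x ∈ (l.foldl pvF (seen, q)).1 → x ∈ seen ∨ x ∈ (l.foldl pvF (seen, q)).2 := by
  induction l with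
  | nil => intro seen q x hx; exact Or.inl hx
  | cons a l ih =>
      intro seen q x hx
      simp only [List.foldl_cons, pvF] at hx ⊢
      by_cases hc : PySem.Set.contains seen a = true
      · rw [if_pos hc] at hx ⊢
        exact ih seen q x hx
      · rw [if_neg hc] at hx ⊢
        rcases ih _ _ x hx with h | h
        · rcases (PySem.Set.mem_add seen a x).mp h with h | h
          · exact Or.inl h
          · subst h
            exact Or.inr (pvF_q_mono l _ _ x (List.mem_append.mpr (Or.inr List.mem_cons_self)))
        · exact Or.inr h

theorem pvF_nodup (l : List PVS) : ∀ (seen : PySem.Set PVS) (q : List PVS),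
    seen.Nodup → (l.foldl pvF (seen, q)).1.Nodup := by
  induction l with
  | nil => intro seen q h; exact h
  | cons a l ih =>
      intro seen q h
      simp only [List.foldl_cons, pvF]
      split
      · exact ih seen q h
      · exact ih _ _ (PySem.Set.nodup_add seen a h)

theorem pvF_len (l : List PVS) : ∀ (seen : PySem.Set PVS) (q : List PVS),
    (l.foldl pvF (seen, q)).2.length + seen.length = q.length + (l.foldl pvF (seen, q)).1.length := by
  induction l with
  | nil => intro seen q; simp only [List.foldl_nil]
  | cons a l ih =>
      intro seen q
      simp only [List.foldl_cons, pvF]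
      split
      · exact ih seen q
      · next hc =>
          have hna : a ∉ seen := by simpa using hc
          have hlen : (PySem.Set.add seen a).length = seen.length + 1 := by
            simp [PySem.Set.add, hna]
          have := ih (PySem.Set.add seen a) (q ++ [a])
          simp only [List.length_append, List.length_cons, List.length_nil, hlen] at this ⊢
          omega

theorem pvF_seen_le (l : List PVS) : ∀ (seen : PySem.Set PVS) (q : List PVS),
    seen.length ≤ (l.foldl pvF (seen, q)).1.length := by
  induction l with
  | nil => intro seen q; exact Nat.le_refl _
  | cons a l ih =>
      intro seen q
      simp only [List.foldl_cons, pvF]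
      split
      · exact ih seen q
      · next hc =>
          have hna : a ∉ seen := by simpa using hc
          have hlen : (PySem.Set.add seen a).length = seen.length + 1 := by
            simp [PySem.Set.add, hna]
          have := ih (PySem.Set.add seen a) (q ++ [a])
          omega

theorem pvBfs_mono (bm : List (Int × Int × Int × Int × List (Int × Int × Int × Int))) :
    ∀ (fuel : Nat) (queue : List PVS) (seen : PySem.Set PVS) (x : PVS),
      x ∈ seen → x ∈ pvBfs bm fuel queue seen := by
  intro fuel
  induction fuel with
  | zero => intro queue seen x hx; exact hx
  | succ fuel ih =>
      intro queue seen x hx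
      cases queue with
      | nil => exact hx
      | cons key rest =>
          rw [pvBfs_cons]
          exact ih _ _ x (pvF_seen_mono _ _ _ x hx)

theorem pvBfs_sound (bm : List (Int × Int × Int × Int × List (Int × Int × Int × Int))) (ends : List PVS) :
    ∀ (fuel : Nat) (queue : List PVS) (seen : PySem.Set PVS),
      (∀ x ∈ seen, pvReach bm ends x) → (∀ x ∈ queue, x ∈ seen) →
      ∀ x ∈ pvBfs bm fuel queue seen, pvReach bm ends x := by
  intro fuel
  induction fuel with
  | zero => intro queue seen hseen _ x hx; exact hseen x hx
  | succ fuel ih =>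
      intro queue seen hseen hq x hx
      cases queue with
      | nil => exact hseen x hx
      | cons key rest =>
          rw [pvBfs_cons] at hx
          refine ih _ _ ?_ ?_ x hx
          · intro y hy
            rcases pvF_seen_sub _ _ _ y hy with h | h
            · exact hseen y h
            · obtain ⟨e, he, hp⟩ := hseen key (hq key List.mem_cons_self)
              exact ⟨e, he, hp.tail h⟩
          · intro y hy
            rcases pvF_q_sub _ _ _ y hy with h | h
            · exact pvF_seen_mono _ _ _ y (hq y (List.mem_cons_of_mem key h))
            · exact h

theorem pvBfs_closed (bm : List (Int × Int × Int × Int × List (Int × Int × Int × Int))) (ends : List PVS) :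
    ∀ (fuel : Nat) (queue : List PVS) (seen : PySem.Set PVS),
      (∀ x ∈ queue, x ∈ seen) → seen.Nodup →
      (∀ x ∈ seen, x ∈ pvUniv ends bm) →
      (∀ s ∈ seen, s ∉ queue → ∀ b ∈ pvPreds bm s, b ∈ seen) →
      queue.length + ((pvUniv ends bm).card - seen.toFinset.card) ≤ fuel →
      ∀ s ∈ pvBfs bm fuel queue seen, ∀ b ∈ pvPreds bm s, b ∈ pvBfs bm fuel queue seen := by
  intro fuel
  induction fuel with
  | zero =>
      intro queue seen hq hnd hsub hproc hf s hs b hb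
      have hq0 : queue = [] := by
        cases queue with
        | nil => rfl
        | cons a l => simp [List.length_cons] at hf
      subst hq0
      exact hproc s hs (by simp) b hb
  | succ fuel ih =>
      intro queue seen hq hnd hsub hproc hf s hs b hb
      cases queue with
      | nil => exact hproc s hs (by simp) b hb
      | cons key rest =>
          rw [pvBfs_cons] at hs ⊢
          set st := (pvPreds bm key).foldl pvF (seen, rest) with hst
          have hsub' : ∀ x ∈ st.1, x ∈ pvUniv ends bm := by
            intro x hx
            rcases pvF_seen_sub _ _ _ x hx with h | h
            · exact hsub x h
            · have := pvPreds_subset_vals bm key x h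
              simp only [pvUniv, List.mem_toFinset, List.mem_append]
              exact Or.inr this
          have hnd' : st.1.Nodup := pvF_nodup _ _ _ hnd
          have hq' : ∀ x ∈ st.2, x ∈ st.1 := by
            intro x hx
            rcases pvF_q_sub _ _ _ x hx with h | h
            · exact pvF_seen_mono _ _ _ x (hq x (List.mem_cons_of_mem key h))
            · exact h
          have hproc' : ∀ t ∈ st.1, t ∉ st.2 → ∀ b ∈ pvPreds bm t, b ∈ st.1 := by
            intro t ht htq b hbt
            rcases pvF_seen_in_q _ _ _ t ht with hts | hts
            · by_cases hk : t = key
              · subst hk; exact pvF_covers _ _ _ b hbt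
              · have htr : t ∉ rest := fun hr => htq (pvF_q_mono _ _ _ t hr)
                have : t ∉ key :: rest := by
                  intro h; rcases List.mem_cons.mp h with h | h
                  · exact hk h
                  · exact htr h
                exact pvF_seen_mono _ _ _ b (hproc t hts this b hbt)
            · exact absurd hts htq
          have hcard_seen : seen.toFinset.card = seen.length := List.toFinset_card_of_nodup hnd
          have hcard_st : st.1.toFinset.card = st.1.length := List.toFinset_card_of_nodup hnd'
          have hle : st.1.length ≤ (pvUniv ends bm).card := pv_len_le_card st.1 _ hnd' hsub'
          have hlen := pvF_len (pvPreds bm key) seen rest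
          have hmle := pvF_seen_le (pvPreds bm key) seen rest
          rw [← hst] at hlen hmle
          have hf' : st.2.length + ((pvUniv ends bm).card - st.1.toFinset.card) ≤ fuel := by
            simp only [List.length_cons] at hf
            rw [hcard_seen] at hf
            rw [hcard_st]
            omega
          exact ih st.2 st.1 hq' hnd' hsub' hproc' hf' s hs b hb


-- ----- B-side lemmas -----

theorem pv_foldl_add_prefix (xs : List PVS) : ∀ (acc : PySem.Set PVS),
    acc <+: xs.foldl PySem.Set.add acc := by
  induction xs with
  | nil => intro acc; exact List.prefix_refl acc
  | cons a xs ih =>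
      intro acc
      refine List.IsPrefix.trans ?_ (ih (PySem.Set.add acc a))
      unfold PySem.Set.add
      split
      · exact List.prefix_refl acc
      · exact ⟨[a], rfl⟩

theorem pvRound_inner_prefix (bm : List (Int × Int × Int × Int × List (Int × Int × Int × Int)))
    (l : List PVS) : ∀ (acc : PySem.Set PVS),
    acc <+: l.foldl (fun nw s => (pvPreds bm s).foldl PySem.Set.add nw) acc := by
  induction l with
  | nil => intro acc; exact List.prefix_refl acc
  | cons a l ih =>
      intro acc
      exact List.IsPrefix.trans (pv_foldl_add_prefix _ acc) (ih _)

theorem pvRound_prefix (bm : List (Int × Int × Int × Int × List (Int × Int × Int × Int)))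
    (seen : PySem.Set PVS) (hnd : seen.Nodup) : seen <+: pvRound bm seen := by
  unfold pvRound
  rw [PySem.Set.ofList_eq_self_of_nodup seen hnd]
  exact pvRound_inner_prefix bm seen seen

theorem pvRound_inner_mem (bm : List (Int × Int × Int × Int × List (Int × Int × Int × Int)))
    (l : List PVS) : ∀ (acc : PySem.Set PVS) (x : PVS),
    x ∈ l.foldl (fun nw s => (pvPreds bm s).foldl PySem.Set.add nw) acc ↔
      x ∈ acc ∨ ∃ s ∈ l, x ∈ pvPreds bm s := by
  induction l with
  | nil => intro acc x; simp
  | cons a l ih =>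
      intro acc x
      simp only [List.foldl_cons]
      rw [ih]
      have hupd : (pvPreds bm a).foldl PySem.Set.add acc = PySem.Set.update acc (pvPreds bm a) := rfl
      rw [hupd, PySem.Set.mem_update]
      constructor
      · rintro ((h | h) | ⟨s, hs, hx⟩)
        · exact Or.inl h
        · exact Or.inr ⟨a, List.mem_cons_self, h⟩
        · exact Or.inr ⟨s, List.mem_cons_of_mem a hs, hx⟩
      · rintro (h | ⟨s, hs, hx⟩)
        · exact Or.inl (Or.inl h)
        · rcases List.mem_cons.mp hs with rfl | hs
          · exact Or.inl (Or.inr hx)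
          · exact Or.inr ⟨s, hs, hx⟩

theorem pvRound_mem (bm : List (Int × Int × Int × Int × List (Int × Int × Int × Int)))
    (seen : PySem.Set PVS) (hnd : seen.Nodup) (x : PVS) :
    x ∈ pvRound bm seen ↔ x ∈ seen ∨ ∃ s ∈ seen, x ∈ pvPreds bm s := by
  unfold pvRound
  rw [PySem.Set.ofList_eq_self_of_nodup seen hnd]
  exact pvRound_inner_mem bm seen seen x

theorem pvRound_inner_nodup (bm : List (Int × Int × Int × Int × List (Int × Int × Int × Int)))
    (l : List PVS) : ∀ (acc : PySem.Set PVS), acc.Nodup →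
    (l.foldl (fun nw s => (pvPreds bm s).foldl PySem.Set.add nw) acc).Nodup := by
  induction l with
  | nil => intro acc h; exact h
  | cons a l ih =>
      intro acc h
      exact ih _ (PySem.Set.nodup_update acc (pvPreds bm a) h)

theorem pvRound_nodup (bm : List (Int × Int × Int × Int × List (Int × Int × Int × Int)))
    (seen : PySem.Set PVS) (hnd : seen.Nodup) : (pvRound bm seen).Nodup := by
  unfold pvRound
  rw [PySem.Set.ofList_eq_self_of_nodup seen hnd]
  exact pvRound_inner_nodup bm seen seen hnd

theorem pvSat_mono (bm : List (Int × Int × Int × Int × List (Int × Int × Int × Int))) :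
    ∀ (r : Nat) (seen : PySem.Set PVS), seen.Nodup → ∀ x ∈ seen, x ∈ pvSat bm r seen := by
  intro r
  induction r with
  | zero => intro seen _ x hx; exact hx
  | succ r ih =>
      intro seen hnd x hx
      simp only [pvSat]
      split
      · exact hx
      · exact ih _ (pvRound_nodup bm seen hnd) x ((pvRound_mem bm seen hnd x).mpr (Or.inl hx))

theorem pvSat_sound (bm : List (Int × Int × Int × Int × List (Int × Int × Int × Int))) (ends : List PVS) :
    ∀ (r : Nat) (seen : PySem.Set PVS), seen.Nodup → (∀ x ∈ seen, pvReach bm ends x) →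
      ∀ x ∈ pvSat bm r seen, pvReach bm ends x := by
  intro r
  induction r with
  | zero => intro seen _ hseen x hx; exact hseen x hx
  | succ r ih =>
      intro seen hnd hseen x hx
      simp only [pvSat] at hx
      split at hx
      · exact hseen x hx
      · refine ih _ (pvRound_nodup bm seen hnd) ?_ x hx
        intro y hy
        rcases (pvRound_mem bm seen hnd y).mp hy with h | ⟨s, hs, hys⟩
        · exact hseen y h
        · obtain ⟨e, he, hp⟩ := hseen s hs
          exact ⟨e, he, hp.tail hys⟩

theorem pvSat_closed (bm : List (Int × Int × Int × Int × List (Int × Int × Int × Int))) (ends : List PVS) :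
    ∀ (r : Nat) (seen : PySem.Set PVS), seen.Nodup →
      (∀ x ∈ seen, x ∈ pvUniv ends bm) →
      (pvUniv ends bm).card + 1 ≤ r + seen.length →
      ∀ s ∈ pvSat bm r seen, ∀ b ∈ pvPreds bm s, b ∈ pvSat bm r seen := by
  intro r
  induction r with
  | zero =>
      intro seen hnd hsub hr s hs b hb
      have := pv_len_le_card seen _ hnd hsub
      omega
  | succ r ih =>
      intro seen hnd hsub hr s hs b hb
      simp only [pvSat] at hs ⊢
      split
      · next heq =>
          split at hs
          · have hpre := pvRound_prefix bm seen hnd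
            have heq2 : pvRound bm seen = seen := (hpre.eq_of_length heq.symm).symm
            have : b ∈ pvRound bm seen :=
              (pvRound_mem bm seen hnd b).mpr (Or.inr ⟨s, hs, hb⟩)
            rw [heq2] at this
            exact this
          · next h => exact absurd heq h
      · next hne =>
          split at hs
          · next h => exact absurd h hne
          · refine ih (pvRound bm seen) (pvRound_nodup bm seen hnd) ?_ ?_ s hs b hb
            · intro x hx
              rcases (pvRound_mem bm seen hnd x).mp hx with h | ⟨t, _, hxt⟩
              · exact hsub x h
              · have := pvPreds_subset_vals bm t x hxt
                simp only [pvUniv, List.mem_toFinset, List.mem_append]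
                exact Or.inr this
            · have hle := (pvRound_prefix bm seen hnd).length_le
              have : seen.length < (pvRound bm seen).length := lt_of_le_of_ne hle (fun h => hne h.symm)
              omega

-- ----- result characterizations -----

theorem pvBfs_init_mem (ends : List PVS) (bm : List (Int × Int × Int × Int × List (Int × Int × Int × Int)))
    (fuel : Nat) (hf : ends.length + (pvUniv ends bm).card ≤ fuel) (x : PVS) :
    x ∈ pvBfs bm fuel ends (PySem.Set.ofList ends) ↔ pvReach bm ends x := by
  constructor
  · refine pvBfs_sound bm ends fuel ends (PySem.Set.ofList ends) ?_ ?_ x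
    · intro y hy
      exact ⟨y, (PySem.Set.mem_ofList ends y).mp hy, Relation.ReflTransGen.refl⟩
    · intro y hy
      exact (PySem.Set.mem_ofList ends y).mpr hy
  · intro hx
    refine pvReach_mem_closed bm ends (fun z => z ∈ pvBfs bm fuel ends (PySem.Set.ofList ends)) ?_ ?_ x hx
    · intro e he
      exact pvBfs_mono bm fuel ends _ e ((PySem.Set.mem_ofList ends e).mpr he)
    · intro a ha b hb
      refine pvBfs_closed bm ends fuel ends (PySem.Set.ofList ends) ?_ (PySem.Set.nodup_ofList ends) ?_ ?_ ?_ a ha b hb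
      · intro y hy; exact (PySem.Set.mem_ofList ends y).mpr hy
      · intro y hy
        simp only [pvUniv, List.mem_toFinset, List.mem_append]
        exact Or.inl ((PySem.Set.mem_ofList ends y).mp hy)
      · intro t ht htq
        exact absurd ((PySem.Set.mem_ofList ends t).mp ht) htq
      · omega

theorem pvSat_init_mem (ends : List PVS) (bm : List (Int × Int × Int × Int × List (Int × Int × Int × Int)))
    (r : Nat) (hr : (pvUniv ends bm).card + 1 ≤ r) (x : PVS) :
    x ∈ pvSat bm r (PySem.Set.ofList ends) ↔ pvReach bm ends x := by
  constructor
  · refine pvSat_sound bm ends r _ (PySem.Set.nodup_ofList ends) ?_ x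
    intro y hy
    exact ⟨y, (PySem.Set.mem_ofList ends y).mp hy, Relation.ReflTransGen.refl⟩
  · intro hx
    refine pvReach_mem_closed bm ends (fun z => z ∈ pvSat bm r (PySem.Set.ofList ends)) ?_ ?_ x hx
    · intro e he
      exact pvSat_mono bm r _ (PySem.Set.nodup_ofList ends) e ((PySem.Set.mem_ofList ends e).mpr he)
    · intro a ha b hb
      refine pvSat_closed bm ends r _ (PySem.Set.nodup_ofList ends) ?_ ?_ a ha b hb
      · intro y hy
        simp only [pvUniv, List.mem_toFinset, List.mem_append]
        exact Or.inl ((PySem.Set.mem_ofList ends y).mp hy)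
      · omega

-- ----- counting -----

theorem pv_count_eq (l1 l2 : List PVS) (h : ∀ x, x ∈ l1 ↔ x ∈ l2) :
    PySem.Set.len (PySem.Set.ofList (l1.map (fun s => (s.1, s.2.1)))) =
      PySem.Set.len (PySem.Set.ofList (l2.map (fun s => (s.1, s.2.1)))) := by
  have key : ∀ (l : List PVS),
      (PySem.Set.ofList (l.map (fun s => (s.1, s.2.1)))).length =
        (l.map (fun s => (s.1, s.2.1))).toFinset.card := by
    intro l
    rw [← List.toFinset_card_of_nodup (PySem.Set.nodup_ofList _)]
    congr 1
    ext x
    simp only [List.mem_toFinset]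
    exact PySem.Set.mem_ofList _ x
  have hfin : (l1.map (fun s : PVS => (s.1, s.2.1))).toFinset =
      (l2.map (fun s : PVS => (s.1, s.2.1))).toFinset := by
    ext x
    simp only [List.mem_toFinset, List.mem_map]
    exact ⟨fun ⟨a, ha, e⟩ => ⟨a, (h a).mp ha, e⟩, fun ⟨a, ha, e⟩ => ⟨a, (h a).mpr ha, e⟩⟩
  unfold PySem.Set.len
  rw [key, key, hfin]

-- ===== VERDICT (by name: the statement is the Claim_ definition above) =====
theorem count_unique_path_points_spec : Claim_equal_count_unique_path_points := by
  intro ends bm _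
  unfold Spec_count_unique_path_points count_unique_path_points count_unique_path_points_alt
  have hcard : (pvUniv ends bm).card ≤ ends.length + (pvVals bm).length := by
    calc (pvUniv ends bm).card ≤ (ends ++ pvVals bm).length := List.toFinset_card_le _
    _ = ends.length + (pvVals bm).length := List.length_append
  have hsum : ((PySem.Dict.values ⟨pvAssoc bm⟩).map List.length).sum = (pvVals bm).length := by
    unfold pvVals PySem.Dict.values
    rw [List.length_flatten, List.map_map]
  have hflat : ((pvAssoc bm).map (fun p => p.2)).flatten.length = (pvVals bm).length := rfl
  refine pv_count_eq _ _ ?_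
  intro x
  rw [pvBfs_init_mem ends bm _ (by rw [hflat]; omega) x,
      pvSat_init_mem ends bm _ (by rw [hsum]; omega) x]
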